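-- pv_equiv track=rewrite | github.com/pantrok/master_thesis | segmentacion.py | greyCumulativeHistogram
-- ===== SOURCE A (Python) =====
-- def greyCumulativeHistogram(bins, histoV, cumulative):
--     if bins == 0:
--         cumulative[0] = histoV[0]
--         return cumulative
--     else:
--         aux = greyCumulativeHistogram(bins - 1, histoV, cumulative)
--         cumulative[bins] = aux[bins - 1] + histoV[bins]
--         return cumulative
-- ===== SOURCE B (Python) =====
-- def greyCumulativeHistogram(bins, histoV, cumulative):
--     cumulative[0] = histoV[0]
--     for i in range(1, bins + 1):
--         cumulative[i] = cumulative[i - 1] + histoV[i]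
--     return cumulative
-- ===== Notes on version B (the rewrite author's own statement) =====
-- stated objective: idiomatic
-- what changed: Replaces the top-down recursion (one Python stack frame per bin) with a bottom-up iterative prefix-sum loop maintaining the running cumulative directly in the array.
import Mathlib
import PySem

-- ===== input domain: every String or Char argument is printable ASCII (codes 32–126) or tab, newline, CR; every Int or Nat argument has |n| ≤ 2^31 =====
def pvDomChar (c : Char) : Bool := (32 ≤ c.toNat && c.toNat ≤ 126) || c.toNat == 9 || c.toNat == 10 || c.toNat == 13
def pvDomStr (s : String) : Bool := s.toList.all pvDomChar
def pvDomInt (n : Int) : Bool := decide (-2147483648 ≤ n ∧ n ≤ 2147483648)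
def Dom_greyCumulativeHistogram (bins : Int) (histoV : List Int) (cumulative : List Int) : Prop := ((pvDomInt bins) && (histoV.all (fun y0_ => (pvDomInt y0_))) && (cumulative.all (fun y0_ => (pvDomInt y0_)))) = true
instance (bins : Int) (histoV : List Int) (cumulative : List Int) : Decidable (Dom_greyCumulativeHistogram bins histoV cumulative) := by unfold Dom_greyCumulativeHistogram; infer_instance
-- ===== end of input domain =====

-- B replaces A's top-down recursion with an iterative bottom-up prefix-sum loop (same return value,
-- same in-place mutation of `cumulative`; equivalence proved about the return value).


-- ===== PORT A =====
-- Literal transliteration of A's recursion; the `else cumulative` branch is the totality guard for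
-- bins < 0, where the Python recursion never returns (excluded by Pre_). pyGetD/pySetD are exact
-- under Pre_'s in-range indices.
def greyCumulativeHistogram (bins : Int) (histoV : List Int) (cumulative : List Int) : List Int :=
  if bins = 0 then
    PySem.List.pySetD cumulative 0 (PySem.List.pyGetD histoV 0 0)
  else if _h : 0 < bins then
    let aux := greyCumulativeHistogram (bins - 1) histoV cumulative
    PySem.List.pySetD aux bins (PySem.List.pyGetD aux (bins - 1) 0 + PySem.List.pyGetD histoV bins 0)
  else cumulative
termination_by bins.toNat
decreasing_by omega

-- ===== PORT B =====
-- B: cumulative[0] = histoV[0]; then for i in range(1, bins+1): cumulative[i] = cumulative[i-1] + histoV[i].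
def greyCumulativeHistogram_alt (bins : Int) (histoV : List Int) (cumulative : List Int) : List Int :=
  (PySem.List.pyRange 1 (bins + 1) 1).foldl
    (fun c i => PySem.List.pySetD c i (PySem.List.pyGetD c (i - 1) 0 + PySem.List.pyGetD histoV i 0))
    (PySem.List.pySetD cumulative 0 (PySem.List.pyGetD histoV 0 0))

-- ===== PRECONDITION & SPEC =====
-- Pre_ excludes bins < 0 (A's recursion never terminates: RecursionError) and lists too short for
-- index bins (IndexError in A).
def Pre_greyCumulativeHistogram (bins : Int) (histoV : List Int) (cumulative : List Int) : Prop :=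
  0 ≤ bins ∧ bins < (histoV.length : Int) ∧ bins < (cumulative.length : Int)
instance (bins : Int) (histoV : List Int) (cumulative : List Int) : Decidable (Pre_greyCumulativeHistogram bins histoV cumulative) := by unfold Pre_greyCumulativeHistogram; infer_instance
def pvWitness_greyCumulativeHistogram : Int × List Int × List Int := (2, [3, 1, 4], [0, 0, 0])

def Spec_greyCumulativeHistogram (bins : Int) (histoV : List Int) (cumulative : List Int) (out : List Int) : Prop := out = greyCumulativeHistogram_alt bins histoV cumulative
instance (bins : Int) (histoV : List Int) (cumulative : List Int) (out : List Int) : Decidable (Spec_greyCumulativeHistogram bins histoV cumulative out) := by unfold Spec_greyCumulativeHistogram; infer_instance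

-- ===== CLAIM (what is proved, stated in full; the proofs are below) =====
def Claim_equal_greyCumulativeHistogram : Prop := ∀ (bins : Int) (histoV : List Int) (cumulative : List Int), Dom_greyCumulativeHistogram bins histoV cumulative → Pre_greyCumulativeHistogram bins histoV cumulative → Spec_greyCumulativeHistogram bins histoV cumulative (greyCumulativeHistogram bins histoV cumulative)

-- ===== LEMMAS AND PROOFS =====

-- A equals B for every nonnegative number of bins, regardless of list lengths.
theorem grey_eq_alt_of_nat (n : Nat) (histoV cumulative : List Int) :
    greyCumulativeHistogram (n : Int) histoV cumulative
      = greyCumulativeHistogram_alt (n : Int) histoV cumulative := by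
  induction n with
  | zero =>
      simp [greyCumulativeHistogram, greyCumulativeHistogram_alt,
        PySem.List.pyRange_one_eq_nil]
  | succ m ih =>
      have hne : ((m + 1 : Nat) : Int) ≠ 0 := by positivity
      have hpos : (0 : Int) < ((m + 1 : Nat) : Int) := by positivity
      have hsplit : PySem.List.pyRange 1 (((m + 1 : Nat) : Int) + 1) 1
          = PySem.List.pyRange 1 ((m : Int) + 1) 1 ++ [((m + 1 : Nat) : Int)] := by
        have : ((m + 1 : Nat) : Int) + 1 = ((m : Int) + 1) + 1 := by push_cast; ring
        rw [this]
        exact PySem.List.pyRange_one_succ_right (by omega)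
      rw [greyCumulativeHistogram]
      simp only [hne, if_false, hpos, dif_pos]
      have hm1 : ((m + 1 : Nat) : Int) - 1 = (m : Int) := by push_cast; ring
      rw [hm1, ih]
      rw [greyCumulativeHistogram_alt, greyCumulativeHistogram_alt, hsplit,
        List.foldl_append]
      simp

-- ===== VERDICT (by name: the statement is the Claim_ definition above) =====
theorem greyCumulativeHistogram_spec : Claim_equal_greyCumulativeHistogram := by
  intro bins histoV cumulative _hDom hPre
  obtain ⟨hb, -, -⟩ := hPre
  unfold Spec_greyCumulativeHistogram
  have h : bins = ((bins.toNat : Nat) : Int) := (Int.toNat_of_nonneg hb).symm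
  rw [h]
  exact grey_eq_alt_of_nat bins.toNat histoV cumulative
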